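-- pv_equiv track=rewrite | github.com/pypi-data/pypi-mirror-398 | packages/lubit/lubit-0.1.0.tar.gz/lubit-0.1.0/lubit/helpers.py | get_quarter_market_ids
-- ===== SOURCE A (Python) =====
-- from typing import List
--
-- def get_quarter_market_ids(zone: str, date_str: str) -> List[str]:
--     """
--     Generate all 96 quarter-hour market IDs for a zone and date.
--
--     Args:
--         zone: Bidding zone (e.g., "DK1")
--         date_str: Date in YYYY-MM-DD format
--
--     Returns:
--         List of 96 market IDs
--
--     Example:
--         ids = get_quarter_market_ids("DK1", "2025-12-23")
--         # ["DK1_2025-12-23_00:00-00:15_Q", "DK1_2025-12-23_00:15-00:30_Q", ...]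
--     """
--     market_ids = []
--     for quarter in range(96):
--         start_minutes = quarter * 15
--         end_minutes = (quarter + 1) * 15
--
--         start_hour = start_minutes // 60
--         start_min = start_minutes % 60
--         end_hour = (end_minutes // 60) % 24
--         end_min = end_minutes % 60
--
--         time_slot = f"{start_hour:02d}:{start_min:02d}-{end_hour:02d}:{end_min:02d}"
--         market_id = f"{zone}_{date_str}_{time_slot}_Q"
--         market_ids.append(market_id)
--     return market_ids
-- ===== SOURCE B (Python) =====
-- def get_quarter_market_ids(zone, date_str):
--     # Stage 1: the 96 quarter-hour boundary labels of the day, plus the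
--     # wrap-around midnight boundary closing the last slot.
--     minutes = ["00", "15", "30", "45"]
--     boundaries = [f"{h:02d}:{m}" for h in range(24) for m in minutes]
--     boundaries.append("00:00")
--     # Stage 2: pair each boundary with its successor to form the slots.
--     return [f"{zone}_{date_str}_{s}-{e}_Q"
--             for s, e in zip(boundaries, boundaries[1:])]
-- ===== Notes on version B (the rewrite author's own statement) =====
-- stated objective: alternative
-- what changed: B computes no end-time at all: it builds the list of 97 boundary labels (96 quarter-hour marks plus a wrap-around '00:00') in one pass and then zips adjacent boundaries into slots, instead of A's per-slot start/end div-mod minute arithmetic with a %24 hour wrap.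
import Mathlib
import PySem

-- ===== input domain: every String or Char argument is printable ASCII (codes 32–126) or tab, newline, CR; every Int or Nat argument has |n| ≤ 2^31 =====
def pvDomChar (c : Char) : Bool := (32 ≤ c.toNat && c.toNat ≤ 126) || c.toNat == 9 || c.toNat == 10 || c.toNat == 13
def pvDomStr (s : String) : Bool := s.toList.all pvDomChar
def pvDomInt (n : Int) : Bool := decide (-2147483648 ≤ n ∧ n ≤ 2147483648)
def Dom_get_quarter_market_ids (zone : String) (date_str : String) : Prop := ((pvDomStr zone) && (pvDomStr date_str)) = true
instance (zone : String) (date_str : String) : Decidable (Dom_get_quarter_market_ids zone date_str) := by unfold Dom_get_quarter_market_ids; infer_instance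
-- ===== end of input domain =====

-- B builds the 97 boundary labels once and zips adjacent ones into slots, instead of A's per-slot start/end div-mod arithmetic (alternative decomposition, same cost).


-- ===== PORT A =====
-- A-side helper: f"{n:02d}" for nonnegative n (exact on this port's 0 ≤ n < 60 values)
def pvFmt2A (n : Int) : String := PySem.Str.zfill (PySem.Int.toStr n) 2

-- port of A: one flat loop over range(96), div/mod arithmetic on minutes
def get_quarter_market_ids (zone : String) (date_str : String) : List String :=
  (PySem.List.pyRange 0 96 1).foldl (fun market_ids quarter =>
    let start_minutes := quarter * 15
    let end_minutes := (quarter + 1) * 15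
    let start_hour := PySem.Int.floordiv start_minutes 60
    let start_min := PySem.Int.mod start_minutes 60
    let end_hour := PySem.Int.mod (PySem.Int.floordiv end_minutes 60) 24
    let end_min := PySem.Int.mod end_minutes 60
    let time_slot := pvFmt2A start_hour ++ ":" ++ pvFmt2A start_min ++ "-" ++ pvFmt2A end_hour ++ ":" ++ pvFmt2A end_min
    market_ids ++ [zone ++ "_" ++ date_str ++ "_" ++ time_slot ++ "_Q"]) []

-- ===== PORT B =====
-- B-side helper: f"{h:02d}" for nonnegative h
def pvFmt2B (n : Int) : String := PySem.Str.zfill (PySem.Int.toStr n) 2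

-- B stage 1: the 96 quarter-hour boundary labels plus the wrap-around midnight boundary
def pvBoundaries : List String :=
  ((PySem.List.pyRange 0 24 1).flatMap (fun h =>
    (["00", "15", "30", "45"] : List String).map (fun m => pvFmt2B h ++ ":" ++ m)))
    ++ ["00:00"]

-- port of B: zip(boundaries, boundaries[1:]) (boundaries[1:] = PySem.List.slice from index 1 = tail) then format each pair
def get_quarter_market_ids_alt (zone : String) (date_str : String) : List String :=
  (pvBoundaries.zip pvBoundaries.tail).map (fun se =>
    zone ++ "_" ++ date_str ++ "_" ++ se.1 ++ "-" ++ se.2 ++ "_Q")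

-- ===== PRECONDITION & SPEC =====
def Spec_get_quarter_market_ids (zone : String) (date_str : String) (out : List String) : Prop := out = get_quarter_market_ids_alt zone date_str
instance (zone : String) (date_str : String) (out : List String) : Decidable (Spec_get_quarter_market_ids zone date_str out) := by unfold Spec_get_quarter_market_ids; infer_instance

-- ===== CLAIM (what is proved, stated in full; the proofs are below) =====
def Claim_equal_get_quarter_market_ids : Prop := ∀ (zone : String) (date_str : String), Dom_get_quarter_market_ids zone date_str → Spec_get_quarter_market_ids zone date_str (get_quarter_market_ids zone date_str)

-- ===== LEMMAS AND PROOFS =====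

-- the time-slot string A computes for a given quarter index
def pvSlotA (quarter : Int) : String :=
  let start_minutes := quarter * 15
  let end_minutes := (quarter + 1) * 15
  let start_hour := PySem.Int.floordiv start_minutes 60
  let start_min := PySem.Int.mod start_minutes 60
  let end_hour := PySem.Int.mod (PySem.Int.floordiv end_minutes 60) 24
  let end_min := PySem.Int.mod end_minutes 60
  pvFmt2A start_hour ++ ":" ++ pvFmt2A start_min ++ "-" ++ pvFmt2A end_hour ++ ":" ++ pvFmt2A end_min

def pvWrap (zone date_str ts : String) : String :=
  zone ++ "_" ++ date_str ++ "_" ++ ts ++ "_Q"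

theorem pvA_eq (zone date_str : String) :
    get_quarter_market_ids zone date_str
      = (PySem.List.pyRange 0 96 1).map (fun q => pvWrap zone date_str (pvSlotA q)) := by
  unfold get_quarter_market_ids
  have h : (fun (market_ids : List String) (quarter : Int) =>
      let start_minutes := quarter * 15
      let end_minutes := (quarter + 1) * 15
      let start_hour := PySem.Int.floordiv start_minutes 60
      let start_min := PySem.Int.mod start_minutes 60
      let end_hour := PySem.Int.mod (PySem.Int.floordiv end_minutes 60) 24
      let end_min := PySem.Int.mod end_minutes 60
      let time_slot := pvFmt2A start_hour ++ ":" ++ pvFmt2A start_min ++ "-" ++ pvFmt2A end_hour ++ ":" ++ pvFmt2A end_min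
      market_ids ++ [zone ++ "_" ++ date_str ++ "_" ++ time_slot ++ "_Q"])
      = (fun acc q => acc ++ [pvWrap zone date_str (pvSlotA q)]) := rfl
  rw [h, PySem.List.foldl_append_singleton_eq_map]
  simp

theorem pvB_eq (zone date_str : String) :
    get_quarter_market_ids_alt zone date_str
      = ((pvBoundaries.zip pvBoundaries.tail).map (fun se => se.1 ++ "-" ++ se.2)).map
          (pvWrap zone date_str) := by
  unfold get_quarter_market_ids_alt pvWrap
  rw [List.map_map]
  refine List.map_congr_left ?_
  rintro ⟨a, b⟩ _
  simp [String.append_assoc]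

set_option maxHeartbeats 2000000 in
theorem pvSlots_eq :
    (pvBoundaries.zip pvBoundaries.tail).map (fun se => se.1 ++ "-" ++ se.2)
      = (PySem.List.pyRange 0 96 1).map pvSlotA := by
  decide

-- ===== VERDICT (by name: the statement is the Claim_ definition above) =====
theorem get_quarter_market_ids_spec : Claim_equal_get_quarter_market_ids := by
  intro zone date_str _
  show get_quarter_market_ids zone date_str = get_quarter_market_ids_alt zone date_str
  rw [pvA_eq, pvB_eq, pvSlots_eq, List.map_map]
  rfl
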